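-- pv_equiv track=rewrite | github.com/FandaCmuchar/PolyDraw | src/parser.py | tokenize_script_to_blocks
-- ===== SOURCE A (Python) =====
-- def tokenize_script_to_blocks(script: str) -> list[str]:
--     lines = [line for line in script.strip().split("\n") if line.strip()]
--     blocks = []
--     current_block = []
--
--     for line in lines:
--         # Odsazení aktuálního řádku
--         indent_level = len(line) - len(line.lstrip())
--
--         if indent_level == 0:
--             # Pokud má řádek nulové odsazení, zahájíme nový blok
--             if current_block:
--                 blocks.append("\n".join(current_block))  # Uložíme předchozí blok
--             current_block = [line]  # Zahájíme nový blok
--         else: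
--             # Pokud má řádek odsazení, přidáme jej do aktuálního bloku
--             current_block.append(line)
--
--     # Přidání posledního bloku
--     if current_block:
--         blocks.append("\n".join(current_block))
--
--     return blocks
-- ===== SOURCE B (Python) =====
-- def tokenize_script_to_blocks(script: str) -> list[str]:
--     lines = [line for line in script.strip().split("\n") if line.strip()]
--     out = []
--     i = 0
--     n = len(lines)
--     while i < n:
--         j = i + 1
--         while j < n and len(lines[j]) != len(lines[j].lstrip()):
--             j += 1
--         out.append("\n".join(lines[i:j]))
--         i = j
--     return out
-- ===== Notes on version B (the rewrite author's own statement) =====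
-- stated objective: alternative
-- what changed: Replaces A's accumulator-and-flush loop with a two-pointer segment scan: for each block start it scans forward to the next zero-indent line and slices-and-joins that segment directly.
import Mathlib
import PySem

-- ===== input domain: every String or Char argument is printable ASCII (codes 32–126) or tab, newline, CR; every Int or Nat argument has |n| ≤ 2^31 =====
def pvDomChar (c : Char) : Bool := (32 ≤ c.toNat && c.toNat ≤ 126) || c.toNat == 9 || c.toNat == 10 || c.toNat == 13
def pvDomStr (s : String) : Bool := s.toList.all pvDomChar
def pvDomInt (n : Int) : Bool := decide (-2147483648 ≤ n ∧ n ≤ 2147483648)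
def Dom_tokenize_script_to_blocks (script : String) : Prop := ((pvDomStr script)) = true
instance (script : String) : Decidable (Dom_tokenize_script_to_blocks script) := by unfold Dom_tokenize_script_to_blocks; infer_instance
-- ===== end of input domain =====

-- B replaces A's accumulator-and-flush loop with a two-pointer segment scan (find each
-- block's end, slice and join); same cost, different decomposition (objective: alternative).

-- `len(line) - len(line.lstrip()) == 0` — the zero-indent test both Pythons literally contain
def pvIndent0 (l : String) : Bool := PySem.Str.len l - PySem.Str.len (PySem.Str.lstrip l) == 0

-- `[line for line in script.strip().split("\n") if line.strip()]` — identical in both Pythons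
def pvLines (script : String) : List String :=
  ((PySem.Str.split? (PySem.Str.strip script) "\n").getD []).filter (fun l => PySem.Str.strip l != "")

-- ===== PORT A =====
-- A's for-loop over lines with state (blocks, current_block), plus the final flush
def tokA_loop : List String → List String → List String → List String
  | [], blocks, cur => if cur.isEmpty then blocks else blocks ++ [PySem.Str.join "\n" cur]
  | l :: ls, blocks, cur =>
    if pvIndent0 l then
      tokA_loop ls (if cur.isEmpty then blocks else blocks ++ [PySem.Str.join "\n" cur]) [l]
    else
      tokA_loop ls blocks (cur ++ [l])

def tokenize_script_to_blocks (script : String) : List String :=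
  tokA_loop (pvLines script) [] []

-- ===== PORT B =====
-- B's inner while: number of steps `j` advances past `i + 1` (count of following indented lines)
def tokB_scan : List String → Nat
  | [] => 0
  | l :: ls => if pvIndent0 l then 0 else tokB_scan ls + 1

-- B's outer while over `i`: each step emits lines[i:j] joined and jumps i to j
def tokB_blocks : List String → List String
  | [] => []
  | l :: ls =>
    let j := tokB_scan ls
    PySem.Str.join "\n" (l :: ls.take j) :: tokB_blocks (ls.drop j)
termination_by xs => xs.length
decreasing_by simp [List.length_drop]

def tokenize_script_to_blocks_alt (script : String) : List String :=
  tokB_blocks (pvLines script)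

-- ===== PRECONDITION & SPEC =====
def Spec_tokenize_script_to_blocks (script : String) (out : List String) : Prop := out = tokenize_script_to_blocks_alt script
instance (script : String) (out : List String) : Decidable (Spec_tokenize_script_to_blocks script out) := by unfold Spec_tokenize_script_to_blocks; infer_instance

-- ===== CLAIM (what is proved, stated in full; the proofs are below) =====
def Claim_equal_tokenize_script_to_blocks : Prop := ∀ (script : String), Dom_tokenize_script_to_blocks script → Spec_tokenize_script_to_blocks script (tokenize_script_to_blocks script)

-- ===== LEMMAS AND PROOFS =====

lemma scan_take (ls : List String) :
    ls.take (tokB_scan ls) = ls.takeWhile (fun l => !pvIndent0 l) := by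
  induction ls with
  | nil => rfl
  | cons l ls ih =>
    simp only [tokB_scan, List.takeWhile]
    cases h : pvIndent0 l <;> simp [ih]

lemma scan_drop (ls : List String) :
    ls.drop (tokB_scan ls) = ls.dropWhile (fun l => !pvIndent0 l) := by
  induction ls with
  | nil => rfl
  | cons l ls ih =>
    simp only [tokB_scan, List.dropWhile]
    cases h : pvIndent0 l <;> simp [ih]

lemma tokB_blocks_nil : tokB_blocks [] = [] := by simp [tokB_blocks]

lemma tokB_blocks_cons (l : String) (ls : List String) :
    tokB_blocks (l :: ls) =
      PySem.Str.join "\n" (l :: ls.takeWhile (fun x => !pvIndent0 x)) ::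
        tokB_blocks (ls.dropWhile (fun x => !pvIndent0 x)) := by
  simp only [tokB_blocks]
  simp only [scan_take, scan_drop]

lemma tokA_loop_append (ls : List String) :
    ∀ blocks cur, tokA_loop ls blocks cur = blocks ++ tokA_loop ls [] cur := by
  induction ls with
  | nil =>
    intro blocks cur
    simp only [tokA_loop]
    cases cur <;> simp
  | cons l ls ih =>
    intro blocks cur
    simp only [tokA_loop]
    cases h : pvIndent0 l
    · simp only [Bool.false_eq_true, if_false]
      exact ih blocks (cur ++ [l])
    · simp only [if_true]
      cases cur with
      | nil => simp; exact ih blocks [l]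
      | cons c cs =>
        simp only [List.isEmpty_cons, Bool.false_eq_true, if_false, List.nil_append]
        rw [ih (blocks ++ [PySem.Str.join "\n" (c :: cs)]) [l],
            ih [PySem.Str.join "\n" (c :: cs)] [l]]
        simp [List.append_assoc]

lemma tokA_loop_key (ls : List String) :
    ∀ cur, cur ≠ [] →
      tokA_loop ls [] cur =
        PySem.Str.join "\n" (cur ++ ls.takeWhile (fun x => !pvIndent0 x)) ::
          tokB_blocks (ls.dropWhile (fun x => !pvIndent0 x)) := by
  induction ls with
  | nil =>
    intro cur hcur
    simp only [tokA_loop, List.takeWhile_nil, List.dropWhile_nil, List.append_nil,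
      tokB_blocks_nil]
    cases cur with
    | nil => exact absurd rfl hcur
    | cons c cs => simp
  | cons l ls ih =>
    intro cur hcur
    simp only [tokA_loop]
    cases h : pvIndent0 l
    · -- indented line joins the current block
      simp only [Bool.false_eq_true, if_false]
      rw [ih (cur ++ [l]) (by simp)]
      simp [List.takeWhile, List.dropWhile, h, List.append_assoc]
    · -- zero indent: flush cur, open a new block [l]
      simp only [if_true]
      have hflush : (if cur.isEmpty then ([] : List String)
          else [] ++ [PySem.Str.join "\n" cur]) = [PySem.Str.join "\n" cur] := by
        cases cur with
        | nil => exact absurd rfl hcur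
        | cons c cs => simp
      rw [hflush, tokA_loop_append, ih [l] (by simp)]
      simp [List.takeWhile, List.dropWhile, h, tokB_blocks_cons]

lemma tokA_eq_tokB (lines : List String) :
    tokA_loop lines [] [] = tokB_blocks lines := by
  cases lines with
  | nil => simp [tokA_loop, tokB_blocks_nil]
  | cons l ls =>
    have hstep : tokA_loop (l :: ls) [] [] = tokA_loop ls [] [l] := by
      simp only [tokA_loop, List.isEmpty_nil, if_true, List.nil_append]
      cases h : pvIndent0 l <;> simp
    rw [hstep, tokA_loop_key ls [l] (by simp), tokB_blocks_cons]
    simp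

-- ===== VERDICT (by name: the statement is the Claim_ definition above) =====
theorem tokenize_script_to_blocks_spec : Claim_equal_tokenize_script_to_blocks := by
  intro script _
  show tokenize_script_to_blocks script = tokenize_script_to_blocks_alt script
  unfold tokenize_script_to_blocks tokenize_script_to_blocks_alt
  exact tokA_eq_tokB (pvLines script)
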